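-- pv_equiv track=rewrite | github.com/jinguo-aitech/financial-analysis | SPY_DTE_Analysis_V005.py | DaysILoosingStreakLocalMax
-- ===== SOURCE A (Python) =====
-- def DaysILoosingStreakLocalMax(mylist):
--     DaysInLoosingStreakLocalMax = []
--     for indx, x in enumerate(mylist):
--         if indx + 1 < len(mylist):
--             if mylist[indx + 1] == 0:
--                 if mylist[indx] == 0:
--                     continue
--                 else:
--                     DaysInLoosingStreakLocalMax.append(mylist[indx])
--             else:
--                 continue
--         if indx == len(mylist) - 1 and mylist[indx] != 0:
--             DaysInLoosingStreakLocalMax.append(mylist[indx])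
--     return DaysInLoosingStreakLocalMax
-- ===== SOURCE B (Python) =====
-- def DaysILoosingStreakLocalMax(mylist):
--     # One pass tracking the last value of the current non-zero run; flush it
--     # when the run ends (at a zero, or at the end of the list).
--     result = []
--     run_last = None
--     for x in mylist:
--         if x != 0:
--             run_last = x
--         elif run_last is not None:
--             result.append(run_last)
--             run_last = None
--     if run_last is not None:
--         result.append(run_last)
--     return result
-- ===== Notes on version B (the rewrite author's own statement) =====
-- stated objective: simpler
-- what changed: B replaces A's per-index lookahead (enumerate plus mylist[indx+1]/len checks) with a single pass that tracks the last value of the current non-zero run and flushes it when the run ends at a zero or at the end of the list.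
import Mathlib
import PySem

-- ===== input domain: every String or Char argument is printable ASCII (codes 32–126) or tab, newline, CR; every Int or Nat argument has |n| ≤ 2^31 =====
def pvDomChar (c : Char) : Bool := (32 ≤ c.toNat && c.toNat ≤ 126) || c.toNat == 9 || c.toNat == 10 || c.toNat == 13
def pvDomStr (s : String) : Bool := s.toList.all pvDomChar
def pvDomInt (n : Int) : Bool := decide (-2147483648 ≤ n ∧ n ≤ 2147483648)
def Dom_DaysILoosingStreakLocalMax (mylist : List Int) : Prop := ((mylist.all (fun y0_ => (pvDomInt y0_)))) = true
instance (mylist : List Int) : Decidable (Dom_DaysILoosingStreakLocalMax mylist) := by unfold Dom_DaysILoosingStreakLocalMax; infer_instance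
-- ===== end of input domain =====

-- B is a simpler single pass tracking the last value of the current non-zero run,
-- instead of A's per-index lookahead; return values proved equal on all inputs.

-- ===== PORT A =====
-- loop body of A; `tail` is the trailing `if indx == len-1 …` statement, reached
-- unless a `continue` fired. Indices are always in range, so pyGetD is exact.
def pvAStep (mylist : List Int) (acc : List Int) (p : Int × Int) : List Int :=
  let indx := p.1
  let n : Int := mylist.length
  let tail : List Int → List Int := fun acc =>
    if indx = n - 1 ∧ PySem.List.pyGetD mylist indx 0 ≠ 0 then
      acc ++ [PySem.List.pyGetD mylist indx 0]
    else acc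
  if indx + 1 < n then
    if PySem.List.pyGetD mylist (indx + 1) 0 = 0 then
      if PySem.List.pyGetD mylist indx 0 = 0 then acc  -- continue
      else tail (acc ++ [PySem.List.pyGetD mylist indx 0])
    else acc  -- continue
  else tail acc

def DaysILoosingStreakLocalMax (mylist : List Int) : List Int :=
  (PySem.List.enumerate mylist).foldl (pvAStep mylist) []

-- ===== PORT B =====
def pvBStep (p : List Int × Option Int) (x : Int) : List Int × Option Int :=
  if x ≠ 0 then (p.1, some x)
  else
    match p.2 with
    | some r => (p.1 ++ [r], none)
    | none => p

def DaysILoosingStreakLocalMax_alt (mylist : List Int) : List Int :=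
  let st := mylist.foldl pvBStep ([], none)
  match st.2 with
  | some r => st.1 ++ [r]
  | none => st.1

-- ===== PRECONDITION & SPEC =====
def Spec_DaysILoosingStreakLocalMax (mylist : List Int) (out : List Int) : Prop := out = DaysILoosingStreakLocalMax_alt mylist
instance (mylist : List Int) (out : List Int) : Decidable (Spec_DaysILoosingStreakLocalMax mylist out) := by unfold Spec_DaysILoosingStreakLocalMax; infer_instance

-- ===== CLAIM (what is proved, stated in full; the proofs are below) =====
def Claim_equal_DaysILoosingStreakLocalMax : Prop := ∀ (mylist : List Int), Dom_DaysILoosingStreakLocalMax mylist → Spec_DaysILoosingStreakLocalMax mylist (DaysILoosingStreakLocalMax mylist)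

-- ===== LEMMAS AND PROOFS =====

-- reference selection: keep x when the next element is 0, or x is last and non-zero
def pvSel : List Int → List Int
  | [] => []
  | [x] => if x = 0 then [] else [x]
  | x :: y :: ys => (if y = 0 ∧ x ≠ 0 then [x] else []) ++ pvSel (y :: ys)

-- value of B's run-tracking fold, as a function of the pending run value
def pvSelS (r : Int) : List Int → List Int
  | [] => [r]
  | y :: ys => if y = 0 then r :: pvSel ys else pvSel (y :: ys)

theorem pvSel_zero_cons (ys : List Int) : pvSel (0 :: ys) = pvSel ys := by
  cases ys with
  | nil => simp [pvSel]
  | cons y ys => simp [pvSel]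

theorem bfold (t : List Int) : ∀ (res : List Int) (o : Option Int),
    (match (t.foldl pvBStep (res, o)).2 with
     | some r => (t.foldl pvBStep (res, o)).1 ++ [r]
     | none => (t.foldl pvBStep (res, o)).1)
    = res ++ (match o with | some r => pvSelS r t | none => pvSel t) := by
  induction t with
  | nil =>
    intro res o
    cases o <;> simp [pvSel, pvSelS]
  | cons x xs ih =>
    intro res o
    by_cases hx : x = 0
    · subst hx
      cases o with
      | none =>
        simp only [List.foldl_cons, pvBStep, pvSel_zero_cons]
        simpa using ih res none
      | some r =>
        simp only [List.foldl_cons, pvBStep, pvSelS]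
        simpa using ih (res ++ [r]) none
    · cases o with
      | none =>
        simp only [List.foldl_cons, pvBStep, if_pos hx]
        rw [ih res (some x)]
        cases xs with
        | nil => simp [pvSel, pvSelS, hx]
        | cons y ys =>
          by_cases hy : y = 0 <;> simp [pvSel, pvSelS, hx, hy, pvSel_zero_cons]
      | some r =>
        simp only [List.foldl_cons, pvBStep, if_pos hx]
        rw [ih res (some x)]
        cases xs with
        | nil => simp [pvSel, pvSelS, hx]
        | cons y ys =>
          by_cases hy : y = 0 <;> simp [pvSel, pvSelS, hx, hy, pvSel_zero_cons]

theorem alt_eq_sel (mylist : List Int) :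
    DaysILoosingStreakLocalMax_alt mylist = pvSel mylist := by
  have h := bfold mylist [] none
  simpa [DaysILoosingStreakLocalMax_alt] using h

theorem afold (l : List Int) : ∀ (t : List Int) (s : Nat) (acc : List Int),
    l.drop s = t →
    (PySem.List.enumerate t (s : Int)).foldl (pvAStep l) acc = acc ++ pvSel t := by
  intro t
  induction t with
  | nil => intro s acc _; simp [PySem.List.enumerate_nil, pvSel]
  | cons x xs ih =>
    intro s acc hdrop
    have hs : s < l.length := by
      by_contra h
      simp [List.drop_eq_nil_of_le (Nat.le_of_not_lt h)] at hdrop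
    have hget : l.getD s 0 = x := by
      have : l[s]? = some x := by
        have := congrArg (fun t => t[0]?) hdrop
        simpa [List.getElem?_drop] using this
      simp [List.getD, this]
    have hdrop1 : l.drop (s + 1) = xs := by
      have := congrArg (fun t => List.drop 1 t) hdrop
      simpa [List.drop_drop] using this
    have hlen : l.length = s + 1 + xs.length := by
      have := congrArg List.length hdrop
      simp at this
      omega
    rw [PySem.List.enumerate_cons, List.foldl_cons]
    have hstep : ∀ acc', (PySem.List.enumerate xs ((s : Int) + 1)).foldl (pvAStep l) acc'
        = acc' ++ pvSel xs := by
      intro acc'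
      have := ih (s + 1) acc' hdrop1
      simpa [Nat.cast_add] using this
    cases xs with
    | nil =>
      -- x is the last element
      simp only [List.length_nil] at hlen
      rw [PySem.List.enumerate_nil, List.foldl_nil]
      simp only [pvAStep, PySem.List.pyGetD_natCast, hget]
      by_cases hx : x = 0 <;>
        simp [pvSel, hx, show (s : Int) = (l.length : Int) - 1 by omega]
    | cons y ys =>
      have hy : l.getD (s + 1) 0 = y := by
        have : l[s+1]? = some y := by
          have := congrArg (fun t => t[0]?) hdrop1
          simpa [List.getElem?_drop] using this
        simp [List.getD, this]
      simp only [List.length_cons] at hlen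
      have hlt : (s : Int) + 1 < (l.length : Int) := by omega
      rw [hstep]
      simp only [pvAStep, PySem.List.pyGetD_natCast, if_pos hlt]
      have h1 : l.getD ((s : Int) + 1).toNat 0 = y := by
        simpa [show ((s : Int) + 1).toNat = s + 1 by omega] using hy
      have hne : ¬((s : Int) = (l.length : Int) - 1) := by omega
      rw [show ((s : Int) + 1) = ((s + 1 : Nat) : Int) by push_cast; ring]
      simp only [PySem.List.pyGetD_natCast, hy, hget]
      by_cases hy0 : y = 0
      · by_cases hx : x = 0
        · simp [pvSel, hx, hy0]
        · simp [pvSel, hx, hy0, hne]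
      · simp [pvSel, hy0]

theorem a_eq_sel (mylist : List Int) :
    DaysILoosingStreakLocalMax mylist = pvSel mylist := by
  have := afold mylist mylist 0 [] (by simp)
  simpa [DaysILoosingStreakLocalMax] using this

-- ===== VERDICT (by name: the statement is the Claim_ definition above) =====
theorem DaysILoosingStreakLocalMax_spec : Claim_equal_DaysILoosingStreakLocalMax := by
  intro mylist _
  unfold Spec_DaysILoosingStreakLocalMax
  rw [a_eq_sel, alt_eq_sel]
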